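-- pv_equiv track=rewrite | github.com/RitabrataRoychowdhury/ImgineAB | src/services/mta_specialist.py | _extract_restrictions
-- ===== SOURCE A (Python) =====
-- from typing import Dict, List, Optional
--
-- def _extract_restrictions(content: str) -> List[str]:
--     """Extract key restrictions from the document"""
--     restriction_patterns = [
--         'shall not', 'prohibited', 'restricted', 'limited to',
--         'only for', 'except', 'without permission', 'not permitted'
--     ]
--
--     restrictions = []
--     for pattern in restriction_patterns:
--         if pattern in content:
--             # Find the sentence containing the restriction
--             sentences = content.split('.')
--             for sentence in sentences:
--                 if pattern in sentence:
--                     restrictions.append(sentence.strip())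
--                     break
--
--     return restrictions[:3]  # Limit to top 3 restrictions
-- ===== SOURCE B (Python) =====
-- from typing import List
--
-- def _extract_restrictions(content: str) -> List[str]:
--     """Extract key restrictions from the document (single pass over sentences)."""
--     restriction_patterns = [
--         'shall not', 'prohibited', 'restricted', 'limited to',
--         'only for', 'except', 'without permission', 'not permitted'
--     ]
--     sentences = content.split('.')
--     found = {}
--     for sentence in sentences:
--         for pattern in restriction_patterns:
--             if pattern in sentence and pattern not in found:
--                 found[pattern] = sentence.strip()
--     return [found[p] for p in restriction_patterns if p in found][:3]
-- ===== Notes on version B (the rewrite author's own statement) =====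
-- stated objective: alternative
-- what changed: A rescans the content and re-splits it into sentences for every pattern; B splits once and makes a single sentence-major pass building a pattern->first-stripped-sentence dict, then emits in pattern order.
import Mathlib
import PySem

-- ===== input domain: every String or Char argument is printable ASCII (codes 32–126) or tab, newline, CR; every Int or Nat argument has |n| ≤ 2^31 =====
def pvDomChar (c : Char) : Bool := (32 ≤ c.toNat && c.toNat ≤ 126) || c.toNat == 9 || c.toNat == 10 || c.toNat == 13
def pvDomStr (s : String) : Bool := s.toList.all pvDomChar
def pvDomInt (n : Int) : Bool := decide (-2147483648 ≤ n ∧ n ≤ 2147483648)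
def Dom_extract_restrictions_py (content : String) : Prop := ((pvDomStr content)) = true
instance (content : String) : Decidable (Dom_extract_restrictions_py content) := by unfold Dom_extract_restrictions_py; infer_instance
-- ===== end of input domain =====

-- B splits the content into sentences once and makes one sentence-major pass recording the first
-- stripped sentence per pattern in a dict, then emits in pattern order; A re-splits and rescans
-- the whole content for every pattern.

def pvPatterns : List String :=
  ["shall not", "prohibited", "restricted", "limited to",
   "only for", "except", "without permission", "not permitted"]

-- ===== PORT A =====
-- inner 'for sentence in sentences: if pattern in sentence: append; break' — first matching sentence
def pvFirstMatch (pattern : String) : List (List Char) → Option (List Char)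
  | [] => none
  | s :: rest =>
    if PySem.Chars.isIn pattern.toList s then some s else pvFirstMatch pattern rest

def extract_restrictions_py (content : String) : List String :=
  let restrictions := pvPatterns.foldl (fun acc pattern =>
    if PySem.Str.isIn pattern content then
      let sentences := PySem.Chars.splitOn content.toList ['.']
      match pvFirstMatch pattern sentences with
      | some s => acc ++ [String.ofList (PySem.Chars.strip s)]
      | none => acc
    else acc) []
  PySem.List.slice restrictions none (some 3)

-- ===== PORT B =====
def extract_restrictions_py_alt (content : String) : List String :=
  let sentences := PySem.Chars.splitOn content.toList ['.']
  let found : PySem.Dict String String := sentences.foldl (fun d s =>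
    pvPatterns.foldl (fun d p =>
      if PySem.Chars.isIn p.toList s && (PySem.Dict.get? d p).isNone then
        PySem.Dict.insert d p (String.ofList (PySem.Chars.strip s))
      else d) d) PySem.Dict.empty
  (pvPatterns.filterMap (fun p => PySem.Dict.get? found p)).take 3

-- ===== PRECONDITION & SPEC =====
def Spec_extract_restrictions_py (content : String) (out : List String) : Prop := out = extract_restrictions_py_alt content
instance (content : String) (out : List String) : Decidable (Spec_extract_restrictions_py content out) := by unfold Spec_extract_restrictions_py; infer_instance

-- ===== CLAIM (what is proved, stated in full; the proofs are below) =====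
def Claim_equal_extract_restrictions_py : Prop := ∀ (content : String), Dom_extract_restrictions_py content → Spec_extract_restrictions_py content (extract_restrictions_py content)

-- ===== LEMMAS AND PROOFS =====

-- every piece produced by Python's split('.') is a contiguous substring of the input
theorem pv_go_infix (sep : List Char) :
    ∀ (fuel : Nat) (l cur : List Char) (acc : List (List Char)) (s : List Char),
      (∀ m ∈ acc, m <:+: s) → (cur.reverse ++ l) <:+: s →
      ∀ m ∈ PySem.Chars.splitOn.go sep fuel l cur acc, m <:+: s := by
  intro fuel
  induction fuel with
  | zero =>
    intro l cur acc s hacc hcur m hm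
    simp only [PySem.Chars.splitOn.go, List.mem_reverse, List.mem_cons] at hm
    rcases hm with h | h
    · exact h ▸ hcur
    · exact hacc m h
  | succ fuel ih =>
    intro l cur acc s hacc hcur m hm
    cases l with
    | nil =>
      simp only [PySem.Chars.splitOn.go, List.mem_reverse, List.mem_cons] at hm
      rcases hm with h | h
      · subst h; simpa using hcur
      · exact hacc m h
    | cons c rest =>
      simp only [PySem.Chars.splitOn.go] at hm
      split at hm
      · refine ih _ _ _ s ?_ ?_ m hm
        · intro m' hm'
          rcases List.mem_cons.mp hm' with h | h
          · subst h
            exact ((List.prefix_append cur.reverse (c :: rest)).isInfix).trans hcur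
          · exact hacc m' h
        · refine List.IsInfix.trans ?_ hcur
          simp only [List.reverse_nil, List.nil_append]
          exact ((List.drop_suffix _ _).isInfix).trans ((List.suffix_append _ _).isInfix)
      · refine ih _ _ _ s hacc ?_ m hm
        simpa using hcur

theorem pv_splitOn_mem_infix (s sep : List Char) (m : List Char)
    (hm : m ∈ PySem.Chars.splitOn s sep) : m <:+: s := by
  have := pv_go_infix sep (s.length + 1) s [] [] s (by simp) (by simp)
  exact this m hm

theorem pvFirstMatch_some (p : String) :
    ∀ (ss : List (List Char)) (s : List Char), pvFirstMatch p ss = some s →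
      s ∈ ss ∧ PySem.Chars.isIn p.toList s = true := by
  intro ss
  induction ss with
  | nil => intro s h; simp [pvFirstMatch] at h
  | cons x rest ih =>
    intro s h
    by_cases hx : PySem.Chars.isIn p.toList x = true
    · simp [pvFirstMatch, hx] at h
      exact ⟨by simp [h], h ▸ hx⟩
    · simp [pvFirstMatch, hx] at h
      obtain ⟨h1, h2⟩ := ih s h
      exact ⟨List.mem_cons_of_mem _ h1, h2⟩

-- the contribution of one pattern in A's loop, with the 'pattern in content' test collapsed
def pvG (content : String) (p : String) : Option String :=
  (pvFirstMatch p (PySem.Chars.splitOn content.toList ['.'])).map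
    (fun s => String.ofList (PySem.Chars.strip s))

theorem pvA_body_eq (content : String) (p : String) (acc : List String) :
    (if PySem.Str.isIn p content then
      match pvFirstMatch p (PySem.Chars.splitOn content.toList ['.']) with
      | some s => acc ++ [String.ofList (PySem.Chars.strip s)]
      | none => acc
    else acc)
    = acc ++ (pvG content p).toList := by
  unfold pvG
  cases h : pvFirstMatch p (PySem.Chars.splitOn content.toList ['.']) with
  | none => simp
  | some s =>
    obtain ⟨hmem, hin⟩ := pvFirstMatch_some p _ s h
    have hinfix : p.toList <:+: content.toList :=
      ((PySem.Chars.isIn_iff_infix _ _).mp hin).trans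
        (pv_splitOn_mem_infix _ _ _ hmem)
    have hc : PySem.Chars.isIn p.toList content.toList = true :=
      (PySem.Chars.isIn_iff_infix _ _).mpr hinfix
    simp [PySem.Str.isIn_eq, hc]

theorem pvA_fold_eq (content : String) :
    ∀ (ps : List String) (acc : List String),
      ps.foldl (fun acc pattern =>
        if PySem.Str.isIn pattern content then
          match pvFirstMatch pattern (PySem.Chars.splitOn content.toList ['.']) with
          | some s => acc ++ [String.ofList (PySem.Chars.strip s)]
          | none => acc
        else acc) acc
      = acc ++ ps.filterMap (pvG content) := by
  intro ps
  induction ps with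
  | nil => intro acc; simp
  | cons p rest ih =>
    intro acc
    simp only [List.foldl_cons, List.filterMap_cons]
    rw [pvA_body_eq, ih]
    cases pvG content p <;> simp

-- B's inner pattern loop: keys other than the processed patterns are untouched
theorem pvB_inner_notmem (s : List Char) (stripped : String) :
    ∀ (ps : List String) (d : PySem.Dict String String) (p : String), p ∉ ps →
      PySem.Dict.get? (ps.foldl (fun d q =>
        if PySem.Chars.isIn q.toList s && (PySem.Dict.get? d q).isNone then
          PySem.Dict.insert d q stripped
        else d) d) p = PySem.Dict.get? d p := by
  intro ps
  induction ps with
  | nil => intro d p _; rfl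
  | cons q rest ih =>
    intro d p hp
    have hpq : p ≠ q := fun h => hp (h ▸ List.mem_cons_self)
    have hrest : p ∉ rest := fun h => hp (List.mem_cons_of_mem _ h)
    simp only [List.foldl_cons]
    rw [ih _ _ hrest]
    split
    · rw [PySem.Dict.get?_insert]; simp [hpq]
    · rfl

theorem pvB_inner_mem (s : List Char) (stripped : String) :
    ∀ (ps : List String) (d : PySem.Dict String String) (p : String),
      ps.Nodup → p ∈ ps →
      PySem.Dict.get? (ps.foldl (fun d q =>
        if PySem.Chars.isIn q.toList s && (PySem.Dict.get? d q).isNone then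
          PySem.Dict.insert d q stripped
        else d) d) p
      = (match PySem.Dict.get? d p with
         | some v => some v
         | none => if PySem.Chars.isIn p.toList s then some stripped else none) := by
  intro ps
  induction ps with
  | nil => intro d p _ hp; simp at hp
  | cons q rest ih =>
    intro d p hnd hp
    have hndr : rest.Nodup := (List.nodup_cons.mp hnd).2
    simp only [List.foldl_cons]
    by_cases hpq : p = q
    · subst hpq
      have hnr : p ∉ rest := (List.nodup_cons.mp hnd).1
      rw [pvB_inner_notmem s stripped rest _ p hnr]
      cases hd : PySem.Dict.get? d p with
      | some v => simp [hd]
      | none =>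
        by_cases hin : PySem.Chars.isIn p.toList s = true
        · simp [hin]
        · simp [hd, Bool.eq_false_iff.mpr hin]
    · have hpr : p ∈ rest := (List.mem_cons.mp hp).resolve_left hpq
      have step : PySem.Dict.get? (if PySem.Chars.isIn q.toList s && (PySem.Dict.get? d q).isNone then
          PySem.Dict.insert d q stripped else d) p = PySem.Dict.get? d p := by
        split
        · rw [PySem.Dict.get?_insert]; simp [hpq]
        · rfl
      rw [ih _ p hndr hpr, step]

-- B's outer sentence loop computes, for each pattern, the stripped first matching sentence
theorem pvB_outer (p : String) (hp : p ∈ pvPatterns) :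
    ∀ (ss : List (List Char)) (d : PySem.Dict String String),
      PySem.Dict.get? (ss.foldl (fun d s =>
        pvPatterns.foldl (fun d q =>
          if PySem.Chars.isIn q.toList s && (PySem.Dict.get? d q).isNone then
            PySem.Dict.insert d q (String.ofList (PySem.Chars.strip s))
          else d) d) d) p
      = (match PySem.Dict.get? d p with
         | some v => some v
         | none => (pvFirstMatch p ss).map (fun s => String.ofList (PySem.Chars.strip s))) := by
  have hnd : pvPatterns.Nodup := by decide
  intro ss
  induction ss with
  | nil => intro d; cases hd : PySem.Dict.get? d p <;> simp [pvFirstMatch, hd]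
  | cons s rest ih =>
    intro d
    simp only [List.foldl_cons]
    rw [ih]
    rw [pvB_inner_mem s _ pvPatterns d p hnd hp]
    cases hd : PySem.Dict.get? d p with
    | some v => simp
    | none =>
      by_cases hin : PySem.Chars.isIn p.toList s = true
      · simp [hin, pvFirstMatch]
      · simp [Bool.eq_false_iff.mpr hin, pvFirstMatch]

-- ===== VERDICT (by name: the statement is the Claim_ definition above) =====
theorem extract_restrictions_py_spec : Claim_equal_extract_restrictions_py := by
  intro content _
  unfold Spec_extract_restrictions_py extract_restrictions_py extract_restrictions_py_alt
  simp only
  rw [pvA_fold_eq]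
  have hsl : ∀ (xs : List String), PySem.List.slice xs none (some 3) = xs.take 3 := by
    intro xs
    rw [PySem.List.slice_to xs (b := 3) (by omega)]
    rfl
  rw [hsl]
  simp only [List.nil_append]
  congr 1
  apply List.filterMap_congr
  intro p hp
  rw [pvB_outer p hp _ PySem.Dict.empty, PySem.Dict.get?_empty]
  rfl
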